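-- pv_equiv track=rewrite | github.com/dvdgatik/POO_python | conteo_abstracto.py | f
-- ===== SOURCE A (Python) =====
-- def f(x):
-- 	respuesta = 0
--
-- 	#loop que no depende de
-- 	for i in range(1000): # 1000
-- 		respuesta += 1
-- 	#loop que depende de
-- 	for i in range(x):
-- 		respuesta += x # x
--
-- 	for i in range(x):
-- 		respuesta += x
--
-- 	for i in range(x):
-- 		for j in range(x):
-- 			respuesta += 1
-- 			respuesta += 1 #x.x = x², 2x²
--
--
-- 	return respuesta # 1
-- ===== SOURCE B (Python) =====
-- def f(x):
--     # closed form for the loop sums: 1000 + x + x (x times each) + 2 per nested-pair = 1000 + 4*x*x when x > 0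
--     return 1000 + 4 * x * x if x > 0 else 1000
-- ===== Notes on version B (the rewrite author's own statement) =====
-- stated objective: faster
-- what changed: Replaced the four counting loops (including the quadratic nested loop) by the closed-form expression 1000 + 4*x*x for x > 0 and 1000 otherwise.
import Mathlib
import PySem

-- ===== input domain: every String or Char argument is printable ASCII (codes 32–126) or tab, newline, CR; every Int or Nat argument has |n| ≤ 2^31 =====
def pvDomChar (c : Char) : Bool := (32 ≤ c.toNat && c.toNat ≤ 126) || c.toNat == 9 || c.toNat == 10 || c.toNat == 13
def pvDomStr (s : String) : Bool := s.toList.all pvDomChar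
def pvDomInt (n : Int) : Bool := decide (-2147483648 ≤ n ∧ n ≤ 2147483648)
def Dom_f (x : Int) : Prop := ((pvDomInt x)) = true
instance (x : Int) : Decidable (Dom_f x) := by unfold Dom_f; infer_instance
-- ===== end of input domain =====

-- B replaces A's four counting loops (one of them a quadratic nested loop) by the
-- closed form 1000 + 4*x*x (x > 0), else 1000; a timing run measures B faster.

-- ===== PORT A =====
def f (x : Int) : Int :=
  let r0 : Int := 0
  let r1 := (PySem.List.pyRange 0 1000 1).foldl (fun a _ => a + 1) r0
  let r2 := (PySem.List.pyRange 0 x 1).foldl (fun a _ => a + x) r1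
  let r3 := (PySem.List.pyRange 0 x 1).foldl (fun a _ => a + x) r2
  let r4 := (PySem.List.pyRange 0 x 1).foldl
      (fun a _ => (PySem.List.pyRange 0 x 1).foldl (fun b _ => (b + 1) + 1) a) r3
  r4

-- ===== PORT B =====
def f_alt (x : Int) : Int :=
  if x > 0 then 1000 + 4 * x * x else 1000

-- ===== PRECONDITION & SPEC =====
def Spec_f (x : Int) (out : Int) : Prop := out = f_alt x
instance (x : Int) (out : Int) : Decidable (Spec_f x out) := by unfold Spec_f; infer_instance

-- ===== CLAIM (what is proved, stated in full; the proofs are below) =====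
def Claim_equal_f : Prop := ∀ (x : Int), Dom_f x → Spec_f x (f x)

-- ===== LEMMAS AND PROOFS =====

-- folding 'add a constant c' over any list adds c * length
theorem foldl_add_const (l : List Int) (c init : Int) :
    l.foldl (fun a _ => a + c) init = init + c * l.length := by
  induction l generalizing init with
  | nil => simp
  | cons h t ih => simp [List.foldl, ih]; ring

theorem foldl_add_two (l : List Int) (init : Int) :
    l.foldl (fun b _ => (b + 1) + 1) init = init + 2 * l.length := by
  induction l generalizing init with
  | nil => simp
  | cons h t ih => simp [List.foldl, ih]; ring

theorem f_closed (x : Int) :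
    f x = 1000 + 2 * x * (x.toNat : Int) + 2 * (x.toNat : Int) * (x.toNat : Int) := by
  unfold f
  simp only [foldl_add_const, foldl_add_two, PySem.List.length_pyRange_one]
  have h1 : ((1000 : Int) - 0).toNat = 1000 := by decide
  rw [h1]
  simp only [Int.sub_zero]
  ring

-- ===== VERDICT (by name: the statement is the Claim_ definition above) =====
theorem f_spec : Claim_equal_f := by
  intro x _
  unfold Spec_f f_alt
  rw [f_closed]
  by_cases hx : x > 0
  · rw [if_pos hx]
    have : ((x.toNat : Int)) = x := Int.toNat_of_nonneg (le_of_lt hx)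
    rw [this]; ring
  · rw [if_neg hx]
    have : x.toNat = 0 := Int.toNat_of_nonpos (le_of_not_gt hx)
    rw [this]; simp
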